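-- pv_equiv track=rewrite | github.com/Yankovsky/yandex-algos-training | hw3/f.py | genome_similarity
-- ===== SOURCE A (Python) =====
-- def genome_similarity(genome_a, genome_b):
--     set_b = set()
--     for i in range(len(genome_b) - 1):
--         set_b.add(genome_b[i:i + 2])
--
--     result = 0
--     for i in range(len(genome_a) - 1):
--         if genome_a[i:i + 2] in set_b:
--             result += 1
--
--     return result
-- ===== SOURCE B (Python) =====
-- def genome_similarity(genome_a, genome_b):
--     counts = {}
--     for i in range(len(genome_a) - 1):
--         bg = genome_a[i:i + 2]
--         counts[bg] = counts.get(bg, 0) + 1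
--     set_b = {genome_b[i:i + 2] for i in range(len(genome_b) - 1)}
--     return sum(c for bg, c in counts.items() if bg in set_b)
-- ===== Notes on version B (the rewrite author's own statement) =====
-- stated objective: alternative
-- what changed: B builds a frequency table (dict counter) of genome_a's bigrams and then sums the counts of the distinct bigrams that occur in genome_b's bigram set, instead of testing membership at every position of genome_a with a running counter.
import Mathlib
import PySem

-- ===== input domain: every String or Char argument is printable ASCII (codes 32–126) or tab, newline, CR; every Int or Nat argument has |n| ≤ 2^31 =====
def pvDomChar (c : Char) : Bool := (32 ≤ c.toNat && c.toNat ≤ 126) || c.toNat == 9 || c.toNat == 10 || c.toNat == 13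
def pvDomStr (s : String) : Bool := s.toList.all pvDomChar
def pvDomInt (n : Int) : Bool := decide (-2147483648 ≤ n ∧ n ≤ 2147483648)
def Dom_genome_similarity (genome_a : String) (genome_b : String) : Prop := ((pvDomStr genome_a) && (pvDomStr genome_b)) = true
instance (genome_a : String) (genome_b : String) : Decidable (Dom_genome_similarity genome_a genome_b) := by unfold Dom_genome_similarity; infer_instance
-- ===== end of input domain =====

-- B replaces A's per-position membership count over genome_a by a bigram frequency table
-- summed over distinct bigrams present in genome_b's bigram set (alternative decomposition, same cost).


-- ===== PORT A =====
def genome_similarity (genome_a : String) (genome_b : String) : Int :=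
  let lb := genome_b.toList
  let set_b : PySem.Set (List Char) :=
    (PySem.List.pyRange 0 ((lb.length : Int) - 1) 1).foldl
      (fun s i => PySem.Set.add s (PySem.List.slice lb (some i) (some (i + 2)))) PySem.Set.empty
  let la := genome_a.toList
  (PySem.List.pyRange 0 ((la.length : Int) - 1) 1).foldl
    (fun result i =>
      if PySem.Set.contains set_b (PySem.List.slice la (some i) (some (i + 2))) then result + 1
      else result) (0 : Int)

-- ===== PORT B =====
def genome_similarity_alt (genome_a : String) (genome_b : String) : Int :=
  let la := genome_a.toList
  let counts : PySem.Dict (List Char) Int :=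
    (PySem.List.pyRange 0 ((la.length : Int) - 1) 1).foldl
      (fun d i =>
        let bg := PySem.List.slice la (some i) (some (i + 2))
        d.insert bg (d.getD bg 0 + 1)) PySem.Dict.empty
  let lb := genome_b.toList
  let set_b : PySem.Set (List Char) :=
    PySem.Set.ofList ((PySem.List.pyRange 0 ((lb.length : Int) - 1) 1).map
      (fun i => PySem.List.slice lb (some i) (some (i + 2))))
  counts.items.foldl (fun s kv => if PySem.Set.contains set_b kv.1 then s + kv.2 else s) (0 : Int)

-- ===== PRECONDITION & SPEC =====
def Spec_genome_similarity (genome_a : String) (genome_b : String) (out : Int) : Prop := out = genome_similarity_alt genome_a genome_b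
instance (genome_a : String) (genome_b : String) (out : Int) : Decidable (Spec_genome_similarity genome_a genome_b out) := by unfold Spec_genome_similarity; infer_instance

-- ===== CLAIM (what is proved, stated in full; the proofs are below) =====
def Claim_equal_genome_similarity : Prop := ∀ (genome_a : String) (genome_b : String), Dom_genome_similarity genome_a genome_b → Spec_genome_similarity genome_a genome_b (genome_similarity genome_a genome_b)

-- ===== LEMMAS AND PROOFS =====

-- the list of bigrams of a string's character list
def pvBigrams (l : List Char) : List (List Char) :=
  (PySem.List.pyRange 0 ((l.length : Int) - 1) 1).map
    (fun i => PySem.List.slice l (some i) (some (i + 2)))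

-- summing the multiplicities of the distinct elements that satisfy p counts the positions satisfying p
theorem pv_sum_count_filter {α : Type} [inst : BEq α] [LawfulBEq α] (xs S : List α) (hn : S.Nodup)
    (hm : ∀ x, x ∈ S ↔ x ∈ xs) (p : α → Bool) :
    ((S.filter p).map (fun k => List.count k xs)).sum = xs.countP p := by
  haveI : DecidableEq α := instDecidableEqOfLawfulBEq
  have hinst : inst = (instBEqOfDecidableEq : BEq α) := lawful_beq_subsingleton _ _
  subst hinst
  have hperm : (S.filter p).Perm (xs.filter p).dedup := by
    refine (List.perm_ext_iff_of_nodup (hn.filter p) (xs.filter p).nodup_dedup).mpr ?_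
    intro x
    simp [List.mem_filter, hm, and_comm]
  have h1 : ((S.filter p).map (fun k => List.count k xs)).sum
      = (((xs.filter p).dedup).map (fun k => List.count k xs)).sum :=
    (hperm.map _).sum_eq
  have h2 : (((xs.filter p).dedup).map (fun k => List.count k xs)).sum
      = (((xs.filter p).dedup).map (fun k => List.count k (xs.filter p))).sum := by
    refine congrArg List.sum (List.map_congr_left ?_)
    intro k hk
    have hpk : p k = true := (List.mem_filter.mp ((xs.filter p).mem_dedup.mp hk)).2
    exact (List.count_filter hpk).symm
  rw [h1, h2, List.sum_map_count_dedup_eq_length, List.countP_eq_length_filter]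

theorem genome_similarity_spec : Claim_equal_genome_similarity := by
  intro genome_a genome_b _
  unfold Spec_genome_similarity genome_similarity genome_similarity_alt
  simp only []
  set la := genome_a.toList with hla
  set lb := genome_b.toList with hlb
  -- both programs build the same set of b-bigrams
  have hset : (PySem.List.pyRange 0 ((lb.length : Int) - 1) 1).foldl
      (fun s i => PySem.Set.add s (PySem.List.slice lb (some i) (some (i + 2)))) PySem.Set.empty
      = PySem.Set.ofList (pvBigrams lb) := by
    rw [PySem.Set.ofList_eq_foldl, pvBigrams, List.foldl_map]
    rfl
  -- A's loop is a positional count of the a-bigrams present in that set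
  have hA : (PySem.List.pyRange 0 ((la.length : Int) - 1) 1).foldl
      (fun result i =>
        if PySem.Set.contains (PySem.Set.ofList (pvBigrams lb))
            (PySem.List.slice la (some i) (some (i + 2))) = true then result + 1
        else result) (0 : Int)
      = ((List.countP (fun bg => PySem.Set.contains (PySem.Set.ofList (pvBigrams lb)) bg)
          (pvBigrams la) : Nat) : Int) := by
    have hmap : (PySem.List.pyRange 0 ((la.length : Int) - 1) 1).foldl
        (fun result i =>
          if PySem.Set.contains (PySem.Set.ofList (pvBigrams lb))
              (PySem.List.slice la (some i) (some (i + 2))) = true then result + 1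
          else result) (0 : Int)
        = (pvBigrams la).foldl
          (fun result bg =>
            if PySem.Set.contains (PySem.Set.ofList (pvBigrams lb)) bg = true then result + 1
            else result) (0 : Int) :=
      (List.foldl_map (f := fun i => PySem.List.slice la (some i) (some (i + 2)))
        (g := fun result bg =>
          if PySem.Set.contains (PySem.Set.ofList (pvBigrams lb)) bg = true then result + 1
          else result)).symm
    rw [hmap, PySem.List.foldl_if_add_one, zero_add]
  -- B's frequency table is the counter of the a-bigrams
  have hcnt : (PySem.List.pyRange 0 ((la.length : Int) - 1) 1).foldl
      (fun d i => d.insert (PySem.List.slice la (some i) (some (i + 2)))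
        (d.getD (PySem.List.slice la (some i) (some (i + 2))) 0 + 1)) PySem.Dict.empty
      = PySem.Dict.counter (pvBigrams la) :=
    (List.foldl_map (f := fun i => PySem.List.slice la (some i) (some (i + 2)))
        (g := fun (d : PySem.Dict (List Char) Int) bg => d.insert bg (d.getD bg 0 + 1))).symm.trans
      (PySem.Dict.foldl_insert_getD_add_one_eq_counter (pvBigrams la))
  rw [hset, hA, hcnt,
    show List.map (fun i => PySem.List.slice lb (some i) (some (i + 2)))
        (PySem.List.pyRange 0 ((lb.length : Int) - 1) 1) = pvBigrams lb from rfl,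
    PySem.Dict.items_counter,
    PySem.List.foldl_if_eq_foldl_filter
      (p := fun kv : List Char × Int => PySem.Set.contains (PySem.Set.ofList (pvBigrams lb)) kv.1)
      (f := fun (s : Int) (kv : List Char × Int) => s + kv.2),
    List.filter_map,
    PySem.List.foldl_add (g := fun kv : List Char × Int => kv.2), zero_add, List.map_map]
  exact show (((List.countP (fun bg => PySem.Set.contains (PySem.Set.ofList (pvBigrams lb)) bg)
        (pvBigrams la) : Nat) : Int)
      = (((PySem.Set.ofList (pvBigrams la)).filter
          (fun k => PySem.Set.contains (PySem.Set.ofList (pvBigrams lb)) k)).map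
          (fun k => ((List.count k (pvBigrams la) : Nat) : Int))).sum) from by
    rw [← pv_sum_count_filter (pvBigrams la) (PySem.Set.ofList (pvBigrams la))
        (PySem.Set.nodup_ofList _) (PySem.Set.mem_ofList _), Nat.cast_list_sum, List.map_map]
    rfl
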